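-- pv_equiv track=rewrite | github.com/CharafChnioune/AceJAM-Studio | app/tests/test_songwriting_toolkit.py | _valid_album_test_lyrics
-- ===== SOURCE A (Python) =====
-- def _valid_album_test_lyrics(required_phrases=None, sections=None, lines_per_section=8):
--     required = [str(item) for item in (required_phrases or []) if str(item)]
--     section_names = sections or ["Verse", "Chorus", "Outro"]
--     lines = []
--     phrase_index = 0
--     for section in section_names:
--         lines.append(f"[{section}]")
--         for line_index in range(lines_per_section):
--             if phrase_index < len(required):
--                 lines.append(required[phrase_index])
--                 phrase_index += 1
--             else:
--                 lines.append(f"Market lanterns carry hopeful voices number {section.lower()} {line_index}")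
--     return "\n".join(lines)
-- ===== SOURCE B (Python) =====
-- def _valid_album_test_lyrics(required_phrases=None, sections=None, lines_per_section=8):
--     required = [str(item) for item in (required_phrases or []) if str(item)]
--     section_names = sections or ["Verse", "Chorus", "Outro"]
--     span = max(lines_per_section, 0)
--     lines = []
--     for position, section in enumerate(section_names):
--         offset = position * span
--         phrases = required[offset:offset + span]
--         lines.append(f"[{section}]")
--         lines.extend(phrases)
--         for line_index in range(len(phrases), lines_per_section):
--             lines.append(f"Market lanterns carry hopeful voices number {section.lower()} {line_index}")
--     return "\n".join(lines)
-- ===== Notes on version B (the rewrite author's own statement) =====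
-- stated objective: alternative
-- what changed: Replaces A's single nested loop with a running phrase_index counter by per-section offset arithmetic (offset = position * span) with list slicing: each section is built as header + sliced phrases + a separate filler loop starting at the slice length.
import Mathlib
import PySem

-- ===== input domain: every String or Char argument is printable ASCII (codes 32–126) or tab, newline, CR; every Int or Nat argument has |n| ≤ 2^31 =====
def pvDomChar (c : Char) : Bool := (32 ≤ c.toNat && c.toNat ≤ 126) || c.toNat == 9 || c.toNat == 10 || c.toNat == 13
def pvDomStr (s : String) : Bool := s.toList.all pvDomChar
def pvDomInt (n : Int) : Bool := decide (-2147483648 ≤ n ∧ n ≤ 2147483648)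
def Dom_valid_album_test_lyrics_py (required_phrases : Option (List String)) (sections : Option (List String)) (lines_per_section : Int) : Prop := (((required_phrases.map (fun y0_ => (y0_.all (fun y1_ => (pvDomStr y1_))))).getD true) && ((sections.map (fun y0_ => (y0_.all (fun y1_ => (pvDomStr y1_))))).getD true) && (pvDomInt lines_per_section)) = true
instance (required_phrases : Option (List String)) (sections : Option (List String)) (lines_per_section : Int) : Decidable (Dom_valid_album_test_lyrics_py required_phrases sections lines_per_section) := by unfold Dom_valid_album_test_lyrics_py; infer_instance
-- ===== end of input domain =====

-- B replaces A's running phrase-index counter by per-section offset arithmetic and list slicing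
-- (phrase pass + filler pass per section); objective: alternative decomposition, same cost.

-- ===== PORT A =====
-- the filler line f"Market lanterns carry hopeful voices number {section.lower()} {line_index}"
def pvFiller (sec : String) (line_index : Int) : String :=
  "Market lanterns carry hopeful voices number " ++ PySem.Str.lower sec ++ " " ++ PySem.Int.toStr line_index

-- body of A's inner `for line_index in range(lines_per_section)` loop
def pvALine (required : List String) (sec : String) (st : List String × Int) (line_index : Int) : List String × Int :=
  if st.2 < (required.length : Int) then
    (st.1 ++ [PySem.List.pyGetD required st.2 ""], st.2 + 1)
  else
    (st.1 ++ [pvFiller sec line_index], st.2)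

-- one iteration of A's outer `for section in section_names` loop (state = (lines, phrase_index))
def pvAStep (required : List String) (lps : Int) (st : List String × Int) (sec : String) : List String × Int :=
  (PySem.List.pyRange 0 lps 1).foldl (pvALine required sec) (st.1 ++ ["[" ++ sec ++ "]"], st.2)

def valid_album_test_lyrics_py (required_phrases : Option (List String)) (sections : Option (List String)) (lines_per_section : Int) : String :=
  -- str(item) is the identity on String; `if str(item)` keeps exactly the nonempty strings
  let required := (required_phrases.getD []).filter (fun item => item ≠ "")
  let secs := sections.getD []
  let section_names := if secs = [] then ["Verse", "Chorus", "Outro"] else secs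
  PySem.Str.join "\n" (section_names.foldl (pvAStep required lines_per_section) ([], 0)).1

-- ===== PORT B =====
-- B's body for one (position, section): header, sliced phrases, then filler lines
def pvBSection (required : List String) (lps : Int) (position : Nat) (sec : String) : List String :=
  let offset : Int := (position : Int) * max lps 0
  let phrases := PySem.List.slice required (some offset) (some (offset + max lps 0))
  ("[" ++ sec ++ "]") :: phrases ++
    (PySem.List.pyRange (phrases.length : Int) lps 1).map (fun line_index => pvFiller sec line_index)

def valid_album_test_lyrics_py_alt (required_phrases : Option (List String)) (sections : Option (List String)) (lines_per_section : Int) : String :=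
  let required := (required_phrases.getD []).filter (fun item => item ≠ "")
  let secs := sections.getD []
  let section_names := if secs = [] then ["Verse", "Chorus", "Outro"] else secs
  PySem.Str.join "\n"
    (section_names.zipIdx.foldl
      (fun lines sp => lines ++ pvBSection required lines_per_section sp.2 sp.1) [])

-- ===== PRECONDITION & SPEC =====
def Spec_valid_album_test_lyrics_py (required_phrases : Option (List String)) (sections : Option (List String)) (lines_per_section : Int) (out : String) : Prop := out = valid_album_test_lyrics_py_alt required_phrases sections lines_per_section
instance (required_phrases : Option (List String)) (sections : Option (List String)) (lines_per_section : Int) (out : String) : Decidable (Spec_valid_album_test_lyrics_py required_phrases sections lines_per_section out) := by unfold Spec_valid_album_test_lyrics_py; infer_instance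

-- ===== CLAIM (what is proved, stated in full; the proofs are below) =====
def Claim_equal_valid_album_test_lyrics_py : Prop := ∀ (required_phrases : Option (List String)) (sections : Option (List String)) (lines_per_section : Int), Dom_valid_album_test_lyrics_py required_phrases sections lines_per_section → Spec_valid_album_test_lyrics_py required_phrases sections lines_per_section (valid_album_test_lyrics_py required_phrases sections lines_per_section)

-- ===== LEMMAS AND PROOFS =====

-- casting helper: an integer range with step 1 is a mapped Nat range'
lemma pvRangeCast : ∀ (t j : Nat) (b : Int), (b - (j : Int)).toNat = t →
    PySem.List.pyRange (j : Int) b 1 = (List.range' j t).map (fun i : Nat => (i : Int)) := by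
  intro t
  induction t with
  | zero => intro j b h; rw [PySem.List.pyRange_one, h]; simp
  | succ t ih =>
    intro j b h
    have hj : (j : Int) < b := by omega
    rw [PySem.List.pyRange_one_cons hj, List.range'_succ, List.map_cons]
    have hc : ((j : Int) + 1) = ((j + 1 : Nat) : Int) := by push_cast; ring
    rw [hc, ih (j + 1) b (by omega)]

-- core of A's inner loop: folding pvALine over indices j, j+1, …, j+t-1 starting at
-- phrase index p emits the next min t (n-p) required phrases then fillers, advancing p.
lemma pvInnerCore (required : List String) (sec : String) :
    ∀ (t j : Nat) (acc : List String) (p : Nat), p ≤ required.length →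
    ((List.range' j t).map (fun k : Nat => (k : Int))).foldl (pvALine required sec) (acc, (p : Int))
      = (acc ++ (required.drop p).take t
          ++ (List.range' (j + min t (required.length - p)) (t - min t (required.length - p))).map
               (fun k : Nat => pvFiller sec (k : Int)),
         ((p + min t (required.length - p) : Nat) : Int)) := by
  intro t
  induction t with
  | zero => intro j acc p hp; simp
  | succ t ih =>
    intro j acc p hp
    rw [List.range'_succ]
    simp only [List.map_cons, List.foldl_cons]
    by_cases hlt : p < required.length
    · have hcond : ((p : Int) < (required.length : Int)) := by exact_mod_cast hlt
      have hstep : pvALine required sec (acc, (p : Int)) (j : Int)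
          = (acc ++ [required[p]], ((p + 1 : Nat) : Int)) := by
        unfold pvALine
        rw [if_pos hcond, PySem.List.pyGetD_natCast, List.getD_eq_getElem _ _ hlt]
        have : ((p : Int)) + 1 = ((p + 1 : Nat) : Int) := by push_cast; ring
        rw [this]
      rw [hstep, ih (j + 1) (acc ++ [required[p]]) (p + 1) (by omega)]
      have hdrop : required.drop p = required[p] :: required.drop (p + 1) :=
        List.drop_eq_getElem_cons hlt
      have h2 : j + 1 + min t (required.length - (p + 1))
          = j + min (t + 1) (required.length - p) := by omega
      have h3 : t - min t (required.length - (p + 1))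
          = t + 1 - min (t + 1) (required.length - p) := by omega
      have h4 : p + 1 + min t (required.length - (p + 1))
          = p + min (t + 1) (required.length - p) := by omega
      rw [hdrop, List.take_succ_cons, h2, h3, h4]
      simp
    · have hp' : p = required.length := by omega
      have hcond : ¬ ((p : Int) < (required.length : Int)) := by exact_mod_cast hlt
      have hstep : pvALine required sec (acc, (p : Int)) (j : Int)
          = (acc ++ [pvFiller sec (j : Int)], (p : Int)) := by
        simp [pvALine, hcond]
      rw [hstep, ih (j + 1) (acc ++ [pvFiller sec (j : Int)]) p hp]
      have hm : min t (required.length - p) = 0 := by omega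
      have hm' : min (t + 1) (required.length - p) = 0 := by omega
      have hd : required.drop p = [] := by rw [hp']; simp
      simp [hm, hm', hd, List.range'_succ]

-- [n]B's slice and filler range, rewritten to A's drop/take shape with p = min n (k·s)
lemma pvBSection_eq (required : List String) (lps : Int) (k : Nat) (sec : String) :
    pvBSection required lps k sec
      = ("[" ++ sec ++ "]") ::
          ((required.drop (min required.length (k * lps.toNat))).take lps.toNat
          ++ (List.range' (min lps.toNat (required.length - min required.length (k * lps.toNat)))
                (lps.toNat - min lps.toNat (required.length - min required.length (k * lps.toNat)))).map
               (fun i : Nat => pvFiller sec (i : Int))) := by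
  set n := required.length with hn
  set s := lps.toNat with hs
  have hmax : max lps 0 = (s : Int) := by rw [hs, Int.toNat_eq_max]
  have hoff : (k : Int) * max lps 0 = ((k * s : Nat) : Int) := by rw [hmax]; push_cast; ring
  have hslice : PySem.List.slice required (some ((k : Int) * max lps 0))
      (some ((k : Int) * max lps 0 + max lps 0))
      = (required.drop (k * s)).take s := by
    rw [hoff, hmax]
    have : ((k * s : Nat) : Int) + (s : Int) = ((k * s : Nat) : Int) + ((s : Nat) : Int) := by rfl
    rw [this, PySem.List.slice_natCast_add]
  have hdt : (required.drop (k * s)).take s = (required.drop (min n (k * s))).take s := by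
    by_cases h : k * s ≤ n
    · rw [min_eq_right h]
    · have h1 : required.drop (k * s) = [] := List.drop_eq_nil_of_le (by omega)
      have h2 : required.drop (min n (k * s)) = [] := List.drop_eq_nil_of_le (by omega)
      rw [h1, h2]
  have hlen : ((required.drop (min n (k * s))).take s).length
      = min s (n - min n (k * s)) := by
    simp [List.length_take, List.length_drop, ← hn]
  have hrange : PySem.List.pyRange ((min s (n - min n (k * s)) : Nat) : Int) lps 1
      = (List.range' (min s (n - min n (k * s))) (s - min s (n - min n (k * s)))).map
          (fun i : Nat => (i : Int)) := by
    set m := min s (n - min n (k * s)) with hm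
    exact pvRangeCast (s - m) m lps (by omega)
  unfold pvBSection
  simp only [hslice, hdt, hlen, hrange, List.map_map]
  simp [Function.comp]

-- A's outer loop, with phrase index min n (k·s) after k sections, equals B's flat build
lemma pvOuter (required : List String) (lps : Int) :
    ∀ (secs : List String) (k : Nat) (acc : List String),
    (secs.foldl (pvAStep required lps)
        (acc, ((min required.length (k * lps.toNat) : Nat) : Int))).1
      = (secs.zipIdx k).foldl
          (fun lines sp => lines ++ pvBSection required lps sp.2 sp.1) acc := by
  intro secs
  induction secs with
  | nil => intro k acc; simp
  | cons sec rest ih =>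
    intro k acc
    rw [List.zipIdx_cons, List.foldl_cons, List.foldl_cons]
    set n := required.length with hn
    set s := lps.toNat with hs
    set p := min n (k * s) with hp
    have hrange : PySem.List.pyRange 0 lps 1
        = (List.range' 0 s).map (fun i : Nat => (i : Int)) := by
      have h0 : (0 : Int) = ((0 : Nat) : Int) := rfl
      rw [h0]
      exact pvRangeCast s 0 lps (by omega)
    have hstep : pvAStep required lps (acc, ((p : Nat) : Int)) sec
        = (acc ++ pvBSection required lps k sec, ((p + min s (n - p) : Nat) : Int)) := by
      unfold pvAStep
      rw [hrange]
      rw [pvInnerCore required sec s 0 (acc ++ ["[" ++ sec ++ "]"]) p (by omega)]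
      rw [pvBSection_eq required lps k sec]
      simp [← hn, ← hs, ← hp]
    rw [hstep]
    have hpk : p + min s (n - p) = min n ((k + 1) * s) := by
      have hks : (k + 1) * s = k * s + s := by ring
      rw [hp, hks]; omega
    rw [hpk, ih (k + 1) (acc ++ pvBSection required lps k sec)]

-- ===== VERDICT (by name: the statement is the Claim_ definition above) =====
theorem valid_album_test_lyrics_py_spec : Claim_equal_valid_album_test_lyrics_py := by
  intro required_phrases sections lines_per_section _
  unfold Spec_valid_album_test_lyrics_py valid_album_test_lyrics_py valid_album_test_lyrics_py_alt
  have h := pvOuter ((required_phrases.getD []).filter (fun item => item ≠ ""))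
    lines_per_section
    (if sections.getD [] = [] then ["Verse", "Chorus", "Outro"] else sections.getD []) 0 []
  refine congrArg (PySem.Str.join "\n") ?_
  simpa using h
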